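-- pv_equiv track=rewrite | github.com/ElliottSax/engineer | training_iterations/training_iteration60.py | minimum_cost_to_reach_destination
-- ===== SOURCE A (Python) =====
-- import heapq
-- from collections import defaultdict, deque
--
-- def minimum_cost_to_reach_destination(n, roads, appleCost, k):
--     """Minimum cost to buy apple from any city."""
--     graph = defaultdict(list)
--     for u, v, w in roads:
--         graph[u].append((v, w))
--         graph[v].append((u, w))
--
--     min_cost = [float('inf')] * (n + 1)
--
--     for start in range(1, n + 1):
--         dist = [float('inf')] * (n + 1)
--         dist[start] = 0
--         heap = [(0, start)]
--
--         while heap: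
--             d, u = heapq.heappop(heap)
--             if d > dist[u]:
--                 continue
--             # Buy apple here and return
--             cost = appleCost[u - 1] + d * (k + 1)
--             min_cost[start] = min(min_cost[start], cost)
--
--             for v, w in graph[u]:
--                 if dist[u] + w < dist[v]:
--                     dist[v] = dist[u] + w
--                     heapq.heappush(heap, (dist[v], v))
--
--     return min_cost[1:]
-- ===== SOURCE B (Python) =====
-- def minimum_cost_to_reach_destination(n, roads, appleCost, k):
--     """Minimum cost to buy apple from any city."""
--     # Single shared table instead of one Dijkstra per start: best[v] starts at the
--     # local apple price and is relaxed Bellman-Ford style along every road with the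
--     # round-trip travel cost w*(k+1), for n rounds.
--     t = k + 1
--     best = [appleCost[i] for i in range(n)]
--     for _ in range(n):
--         for u, v, w in roads:
--             c = w * t
--             if best[u - 1] + c < best[v - 1]:
--                 best[v - 1] = best[u - 1] + c
--             if best[v - 1] + c < best[u - 1]:
--                 best[u - 1] = best[v - 1] + c
--     return best
-- ===== Notes on version B (the rewrite author's own statement) =====
-- stated objective: alternative
-- what changed: A runs one lazy Dijkstra (heap + dist array) from every city and takes the running minimum of appleCost[u]+dist*(k+1) during pops; B drops the per-city searches and the heap entirely and relaxes one shared table, seeded with the apple prices, Bellman-Ford style along every road with round-trip weight w*(k+1) for n rounds.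
-- outside the precondition, e.g. on minimum_cost_to_reach_destination(2, [(0, 1, 1)], [7, 9], 0): A returns [7, 9], B returns [7, 8]; on minimum_cost_to_reach_destination(2, [(1, 2, 1)], [5, 5], -3): A returns [3, 3], B returns [-3, -1]; on minimum_cost_to_reach_destination(2, [(1, 2, -1)], [5, 5], 0): A does not finish within the time limit, B returns [1, 2]
import Mathlib
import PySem

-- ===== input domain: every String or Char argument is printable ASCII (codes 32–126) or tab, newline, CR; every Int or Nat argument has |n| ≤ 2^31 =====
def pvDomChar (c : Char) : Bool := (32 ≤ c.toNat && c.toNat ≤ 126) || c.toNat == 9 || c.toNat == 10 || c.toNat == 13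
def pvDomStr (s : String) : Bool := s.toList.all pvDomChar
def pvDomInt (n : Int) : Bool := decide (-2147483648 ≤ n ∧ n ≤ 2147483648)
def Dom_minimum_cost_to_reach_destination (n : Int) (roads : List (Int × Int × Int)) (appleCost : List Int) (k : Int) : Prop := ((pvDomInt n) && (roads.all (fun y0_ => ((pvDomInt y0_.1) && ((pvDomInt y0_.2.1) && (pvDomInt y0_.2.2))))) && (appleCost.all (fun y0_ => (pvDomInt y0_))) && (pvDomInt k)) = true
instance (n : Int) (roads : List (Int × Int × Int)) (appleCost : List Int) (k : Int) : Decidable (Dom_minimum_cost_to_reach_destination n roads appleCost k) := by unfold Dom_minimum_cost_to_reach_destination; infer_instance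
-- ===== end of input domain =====

-- B replaces A's per-city Dijkstra runs by a single shared Bellman-Ford-style table seeded with
-- the apple prices and relaxed along every road with round-trip weight w*(k+1) (objective:
-- alternative — one shared table and no heap).

-- ===== PORT A =====
-- appleCost[u - 1]; the .getD 0 default is never reached under Pre_ (1 ≤ u ≤ n ≤ len appleCost)
def pvApple (appleCost : List Int) (u : Int) : Int := (PySem.List.pyGet? appleCost (u - 1)).getD 0

-- graph = defaultdict(list); graph[u].append((v, w)); graph[v].append((u, w))
def pvGraph (roads : List (Int × Int × Int)) : PySem.Dict Int (List (Int × Int)) :=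
  roads.foldl (fun g r =>
    (g.modify r.1 [] (· ++ [(r.2.1, r.2.2)])).modify r.2.1 [] (· ++ [(r.1, r.2.2)]))
    PySem.Dict.empty

-- min(min_cost[start], cost) where min_cost[start] may still be float('inf') (= none)
def pvMinD (mc : Option Int) (c : Int) : Option Int :=
  match mc with
  | none => some c
  | some m => some (min m c)

-- heapq.heappush: the heap is kept as a list sorted by the lexicographic tuple order, so that
-- popping the head is exactly heapq.heappop (the minimum tuple)
def pvHeapPush (heap : List (Int × Int)) (x : Int × Int) : List (Int × Int) :=
  match heap with
  | [] => [x]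
  | y :: ys => if x.1 < y.1 ∨ (x.1 = y.1 ∧ x.2 ≤ y.2) then x :: y :: ys else y :: pvHeapPush ys x

-- `a < dist[v]` where dist[v] may still be float('inf') (= none)
def pvLtInf (a : Int) (o : Option Int) : Bool :=
  match o with
  | none => true
  | some b => a < b

-- the inner `for v, w in graph[u]` relaxation loop of A
def pvRelax (dist : Int → Option Int) (heap : List (Int × Int)) (u : Int)
    (nbrs : List (Int × Int)) : (Int → Option Int) × List (Int × Int) :=
  nbrs.foldl (fun st p =>
    match st.1 u with
    | none => st  -- unreachable: the popped vertex always has a finite distance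
    | some du =>
      if pvLtInf (du + p.2) (st.1 p.1) then
        (fun x => if x = p.1 then some (du + p.2) else st.1 x,
         pvHeapPush st.2 (du + p.2, p.1))
      else st) (dist, heap)

-- termination measure for the `while heap` loop: (#cities still at inf, sum of finite distances, heap size)
def pvMu (n : Int) (dist : Int → Option Int) : Nat × Nat :=
  (((Finset.range (n.toNat + 1)).filter (fun i => dist ((i : Nat) : Int) = none)).card,
   ∑ i ∈ Finset.range (n.toNat + 1), ((dist ((i : Nat) : Int)).getD 0).toNat)

-- the `while heap:` loop of A (dist is the Python list dist[0..n] as a table; mc = min_cost[start],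
-- none = float('inf')).  The dite is a pure totality guard: under Pre_ (nonnegative weights,
-- city labels in 1..n) it provably always holds, and the Python loop terminates exactly there.
def pvALoop (n : Int) (adj : PySem.Dict Int (List (Int × Int))) (appleCost : List Int) (k : Int)
    (dist : Int → Option Int) (heap : List (Int × Int)) (mc : Option Int) : Option Int :=
  match heap with
  | [] => mc
  | (d, u) :: rest =>
    match dist u with
    | none => mc  -- unreachable under Pre_: every heap entry points at a finite distance
    | some du =>
      if du < d then  -- `if d > dist[u]: continue`
        pvALoop n adj appleCost k dist rest mc
      else
        let c := pvApple appleCost u + d * (k + 1)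
        let mc' := pvMinD mc c
        let st := pvRelax dist rest u (adj.getD u [])
        if h : (pvMu n st.1).1 < (pvMu n dist).1 ∨
               ((pvMu n st.1).1 = (pvMu n dist).1 ∧ (pvMu n st.1).2 < (pvMu n dist).2) ∨
               (pvMu n st.1 = pvMu n dist ∧ st.2.length < rest.length + 1) then
          pvALoop n adj appleCost k st.1 st.2 mc'
        else mc'  -- totality guard, never taken under Pre_
termination_by ((pvMu n dist).1, (pvMu n dist).2, heap.length)
decreasing_by
  · exact Prod.Lex.right _ (Prod.Lex.right _ (by simp))
  · rcases h with h | h | h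
    · exact Prod.Lex.left _ _ h
    · rw [h.1]; exact Prod.Lex.right _ (Prod.Lex.left _ _ h.2)
    · rw [h.1]; exact Prod.Lex.right _ (Prod.Lex.right _ (by simpa using h.2))

def minimum_cost_to_reach_destination (n : Int) (roads : List (Int × Int × Int))
    (appleCost : List Int) (k : Int) : List Int :=
  let graph := pvGraph roads
  -- min_cost[1:] where min_cost[start] is the result of one Dijkstra run per start;
  -- .getD 0 is unreachable: min_cost[start] is always set when start itself is popped (d = 0)
  (PySem.List.pyRange 1 (n + 1) 1).map (fun start =>
    (pvALoop n graph appleCost k (fun v => if v = start then some 0 else none)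
      [(0, start)] none).getD 0)

-- ===== PORT B =====
-- best[v - 1] = val (the table is kept as a map on the cities 1..n)
def pvBUpd (best : Int → Int) (v val : Int) : Int → Int :=
  fun x => if x = v then val else best x

-- first `if` of the road relaxation in Source B (direction u → v, travel rate c = w*t)
def pvBHalf (t : Int) (best : Int → Int) (r : Int × Int × Int) : Int → Int :=
  if best r.1 + r.2.2 * t < best r.2.1 then pvBUpd best r.2.1 (best r.1 + r.2.2 * t) else best

-- second `if` (direction v → u), applied after the first
def pvBStep2 (t : Int) (b1 : Int → Int) (r : Int × Int × Int) : Int → Int :=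
  if b1 r.2.1 + r.2.2 * t < b1 r.1 then pvBUpd b1 r.1 (b1 r.2.1 + r.2.2 * t) else b1

-- one relaxation of road r, both directions (the two sequential `if`s of Source B)
def pvBStep (t : Int) (best : Int → Int) (r : Int × Int × Int) : Int → Int :=
  pvBStep2 t (pvBHalf t best r) r

-- one full `for u, v, w in roads` round
def pvBRound (roads : List (Int × Int × Int)) (t : Int) (best : Int → Int) : Int → Int :=
  roads.foldl (pvBStep t) best

def minimum_cost_to_reach_destination_alt (n : Int) (roads : List (Int × Int × Int))
    (appleCost : List Int) (k : Int) : List Int :=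
  let t := k + 1
  -- best = [appleCost[i] for i in range(n)], kept as a table on the cities 1..n
  let best0 : Int → Int := fun v => pvApple appleCost v
  let best := (List.range n.toNat).foldl (fun b _ => pvBRound roads t b) best0
  (List.range n.toNat).map (fun (i : Nat) => best ((i : Int) + 1))

-- ===== PRECONDITION & SPEC =====
-- Pre_ restricts to the function's natural domain: either no city at all (n ≤ 0, both return []),
-- or at least n apple prices, road endpoints that are city labels 1..n, nonnegative road weights
-- and a multiplier k ≥ -1; outside that A raises IndexError, diverges on a negative-weight edge,
-- returns values produced by Python's negative-index wraparound on a malformed city label, or (for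
-- k ≤ -2) rewards longer trips, where A's and B's answers are both arbitrary readings of the input.
def Pre_minimum_cost_to_reach_destination (n : Int) (roads : List (Int × Int × Int)) (appleCost : List Int) (k : Int) : Prop :=
  n ≤ 0 ∨
  ((n : Int) ≤ (appleCost.length : Int) ∧ -1 ≤ k ∧
   ∀ r ∈ roads, (1 ≤ r.1 ∧ r.1 ≤ n) ∧ (1 ≤ r.2.1 ∧ r.2.1 ≤ n) ∧ 0 ≤ r.2.2)
instance (n : Int) (roads : List (Int × Int × Int)) (appleCost : List Int) (k : Int) : Decidable (Pre_minimum_cost_to_reach_destination n roads appleCost k) := by unfold Pre_minimum_cost_to_reach_destination; infer_instance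

def pvWitness_minimum_cost_to_reach_destination : Int × (List (Int × Int × Int)) × List Int × Int :=
  (2, [(1, 2, 3)], [5, 7], 1)

def Spec_minimum_cost_to_reach_destination (n : Int) (roads : List (Int × Int × Int)) (appleCost : List Int) (k : Int) (out : List Int) : Prop := out = minimum_cost_to_reach_destination_alt n roads appleCost k
instance (n : Int) (roads : List (Int × Int × Int)) (appleCost : List Int) (k : Int) (out : List Int) : Decidable (Spec_minimum_cost_to_reach_destination n roads appleCost k out) := by unfold Spec_minimum_cost_to_reach_destination; infer_instance

-- ===== CLAIM (what is proved, stated in full; the proofs are below) =====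
def Claim_equal_minimum_cost_to_reach_destination : Prop := ∀ (n : Int) (roads : List (Int × Int × Int)) (appleCost : List Int) (k : Int), Dom_minimum_cost_to_reach_destination n roads appleCost k → Pre_minimum_cost_to_reach_destination n roads appleCost k → Spec_minimum_cost_to_reach_destination n roads appleCost k (minimum_cost_to_reach_destination n roads appleCost k)

-- ===== LEMMAS AND PROOFS =====

-- an undirected edge of weight w between a and b
def pvEdge (roads : List (Int × Int × Int)) (a b w : Int) : Prop :=
  (a, b, w) ∈ roads ∨ (b, a, w) ∈ roads

-- es is a walk from s to u (each element (a, b, w): an edge a-b of weight w, traversed a → b)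
def pvIsWalk (roads : List (Int × Int × Int)) : Int → List (Int × Int × Int) → Int → Prop
  | s, [], u => u = s
  | s, e :: es, u => e.1 = s ∧ pvEdge roads s e.2.1 e.2.2 ∧ pvIsWalk roads e.2.1 es u

def pvW (es : List (Int × Int × Int)) : Int := (es.map (fun e => e.2.2)).sum

lemma pvW_nil : pvW [] = 0 := rfl

lemma pvW_cons (e : Int × Int × Int) (es : List (Int × Int × Int)) :
    pvW (e :: es) = e.2.2 + pvW es := by simp [pvW]

lemma pvW_append (es1 es2 : List (Int × Int × Int)) :
    pvW (es1 ++ es2) = pvW es1 + pvW es2 := by simp [pvW]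

lemma pvWalk_append {roads : List (Int × Int × Int)} {u v w : Int}
    (he : pvEdge roads u v w) :
    ∀ {es : List (Int × Int × Int)} {s : Int}, pvIsWalk roads s es u →
      pvIsWalk roads s (es ++ [(u, v, w)]) v := by
  intro es
  induction es with
  | nil =>
    intro s hw
    have hus : u = s := hw
    subst hus
    exact ⟨rfl, he, rfl⟩
  | cons e tl ih =>
    intro s hw
    obtain ⟨h1, h2, h3⟩ := hw
    exact ⟨h1, h2, ih h3⟩

lemma pvW_nonneg {roads : List (Int × Int × Int)} (hr : ∀ r ∈ roads, 0 ≤ r.2.2) {u : Int} :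
    ∀ {es : List (Int × Int × Int)} {s : Int}, pvIsWalk roads s es u → 0 ≤ pvW es := by
  intro es
  induction es with
  | nil => intro s _; simp [pvW]
  | cons e tl ih =>
    intro s hw
    obtain ⟨h1, h2, h3⟩ := hw
    have h0 : 0 ≤ e.2.2 := by rcases h2 with h | h
                              · exact hr (s, e.2.1, e.2.2) h
                              · exact hr (e.2.1, s, e.2.2) h
    have := ih h3
    rw [pvW_cons]; omega

-- the vertex sequence of a walk
def pvVerts (s : Int) (es : List (Int × Int × Int)) : List Int := s :: es.map (fun e => e.2.1)

lemma pvVerts_range {n : Int} {roads : List (Int × Int × Int)}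
    (hr : ∀ r ∈ roads, (1 ≤ r.1 ∧ r.1 ≤ n) ∧ (1 ≤ r.2.1 ∧ r.2.1 ≤ n) ∧ 0 ≤ r.2.2) {u : Int} :
    ∀ {es : List (Int × Int × Int)} {s : Int}, 1 ≤ s → s ≤ n → pvIsWalk roads s es u →
      ∀ x ∈ pvVerts s es, 1 ≤ x ∧ x ≤ n := by
  intro es
  induction es with
  | nil =>
    intro s h1 h2 _ x hx
    have : x = s := by simpa [pvVerts] using hx
    subst this; exact ⟨h1, h2⟩
  | cons e tl ih =>
    intro s h1 h2 hw x hx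
    obtain ⟨he1, he2, he3⟩ := hw
    have hb : 1 ≤ e.2.1 ∧ e.2.1 ≤ n := by
      rcases he2 with h | h
      · exact (hr (s, e.2.1, e.2.2) h).2.1
      · exact (hr (e.2.1, s, e.2.2) h).1
    have hx' : x = s ∨ x ∈ pvVerts e.2.1 tl := by
      simp only [pvVerts, List.map_cons, List.mem_cons] at hx ⊢
      tauto
    rcases hx' with rfl | hxt
    · exact ⟨h1, h2⟩
    · exact ih hb.1 hb.2 he3 x hxt

lemma pvWalk_split {roads : List (Int × Int × Int)} {u x : Int} :
    ∀ {es : List (Int × Int × Int)} {s : Int}, pvIsWalk roads s es u → x ∈ pvVerts s es →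
    ∃ es1 es2, es = es1 ++ es2 ∧ pvIsWalk roads s es1 x ∧ pvIsWalk roads x es2 u := by
  intro es
  induction es with
  | nil =>
    intro s hw hx
    have hus : u = s := hw
    have hxs : x = s := by simpa [pvVerts] using hx
    subst hus; subst hxs
    exact ⟨[], [], rfl, rfl, rfl⟩
  | cons e tl ih =>
    intro s hw hx
    obtain ⟨h1, h2, h3⟩ := hw
    have hx' : x = s ∨ x ∈ pvVerts e.2.1 tl := by
      simp only [pvVerts, List.map_cons, List.mem_cons] at hx ⊢
      tauto
    rcases hx' with rfl | hxt
    · exact ⟨[], e :: tl, rfl, rfl, ⟨h1, h2, h3⟩⟩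
    · obtain ⟨l1, l2, heq, w1, w2⟩ := ih h3 hxt
      exact ⟨e :: l1, l2, by rw [heq, List.cons_append], ⟨h1, h2, w1⟩, w2⟩

lemma pvWalk_cut {roads : List (Int × Int × Int)} (hr : ∀ r ∈ roads, 0 ≤ r.2.2) {u : Int} :
    ∀ {es : List (Int × Int × Int)} {s : Int}, pvIsWalk roads s es u →
    (pvVerts s es).Nodup ∨
      ∃ es', pvIsWalk roads s es' u ∧ pvW es' ≤ pvW es ∧ es'.length < es.length := by
  intro es
  induction es with
  | nil => intro s _; left; simp [pvVerts]
  | cons e tl ih =>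
    intro s hw
    obtain ⟨h1, h2, h3⟩ := hw
    have h0e : 0 ≤ e.2.2 := by rcases h2 with h | h
                               · exact hr (s, e.2.1, e.2.2) h
                               · exact hr (e.2.1, s, e.2.2) h
    rcases ih h3 with hnd | ⟨es', hw', hle, hlt⟩
    · by_cases hxs : s ∈ pvVerts e.2.1 tl
      · obtain ⟨l1, l2, heq, w1, w2⟩ := pvWalk_split h3 hxs
        right
        refine ⟨l2, w2, ?_, ?_⟩
        · have h01 : 0 ≤ pvW l1 := pvW_nonneg hr w1
          have : pvW tl = pvW l1 + pvW l2 := by rw [heq, pvW_append]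
          rw [pvW_cons]; omega
        · have hl2 : l2.length ≤ tl.length := by
            rw [heq]; simp
          simp only [List.length_cons]; omega
      · left
        simp only [pvVerts, List.map_cons] at hnd hxs ⊢
        exact List.nodup_cons.mpr ⟨by simpa [pvVerts] using hxs, hnd⟩
    · right
      refine ⟨e :: es', ⟨h1, h2, hw'⟩, ?_, ?_⟩
      · rw [pvW_cons, pvW_cons]; omega
      · simp only [List.length_cons]; omega

lemma pvWalk_shorten {n : Int} {roads : List (Int × Int × Int)}
    (hr : ∀ r ∈ roads, (1 ≤ r.1 ∧ r.1 ≤ n) ∧ (1 ≤ r.2.1 ∧ r.2.1 ≤ n) ∧ 0 ≤ r.2.2)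
    {s u : Int} (hs1 : 1 ≤ s) (hs2 : s ≤ n) :
    ∀ {es : List (Int × Int × Int)}, pvIsWalk roads s es u →
    ∃ es', pvIsWalk roads s es' u ∧ pvW es' ≤ pvW es ∧ es'.length < n.toNat := by
  have hn1 : 1 ≤ n := le_trans hs1 hs2
  have hw0 : ∀ r ∈ roads, 0 ≤ r.2.2 := fun r hm => (hr r hm).2.2
  have key : ∀ (L : Nat), ∀ {es : List (Int × Int × Int)}, es.length ≤ L →
      pvIsWalk roads s es u →
      ∃ es', pvIsWalk roads s es' u ∧ pvW es' ≤ pvW es ∧ es'.length < n.toNat := by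
    intro L
    induction L with
    | zero =>
      intro es hlen hw
      have : es = [] := List.eq_nil_of_length_eq_zero (Nat.le_zero.mp hlen)
      subst this
      exact ⟨[], hw, le_rfl, by omega⟩
    | succ L ih =>
      intro es hlen hw
      by_cases hsmall : es.length < n.toNat
      · exact ⟨es, hw, le_rfl, hsmall⟩
      · rcases pvWalk_cut hw0 hw with hnd | ⟨es', hw', hle, hlt⟩
        · exfalso
          have hrange := pvVerts_range hr hs1 hs2 hw
          have hsub : (pvVerts s es).toFinset ⊆ Finset.Icc (1 : Int) n := by
            intro x hx
            simp only [List.mem_toFinset] at hx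
            have := hrange x hx
            simp only [Finset.mem_Icc]
            omega
          have hcard : (pvVerts s es).toFinset.card = (pvVerts s es).length :=
            List.toFinset_card_of_nodup hnd
          have hle' := Finset.card_le_card hsub
          have hIcc : (Finset.Icc (1 : Int) n).card = n.toNat := by
            rw [Int.card_Icc]; omega
          have hlenverts : (pvVerts s es).length = es.length + 1 := by simp [pvVerts]
          omega
        · obtain ⟨es'', hw'', hle'', hlt''⟩ := ih (by omega) hw'
          exact ⟨es'', hw'', le_trans hle'' hle, hlt''⟩
  intro es hw
  exact key es.length le_rfl hw

lemma pvGraph_mem_aux :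
    ∀ (rs : List (Int × Int × Int)) (g : PySem.Dict Int (List (Int × Int))) (a : Int)
      (p : Int × Int),
    p ∈ ((rs.foldl (fun g r =>
        (g.modify r.1 [] (· ++ [(r.2.1, r.2.2)])).modify r.2.1 [] (· ++ [(r.1, r.2.2)])) g).getD a []) ↔
      p ∈ g.getD a [] ∨ (a, p.1, p.2) ∈ rs ∨ (p.1, a, p.2) ∈ rs := by
  intro rs
  induction rs with
  | nil => intro g a p; simp
  | cons r tl ih =>
    intro g a p
    rcases r with ⟨x, y, w⟩
    rcases p with ⟨b, w'⟩
    rw [List.foldl_cons, ih]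
    rw [PySem.Dict.getD_modify, PySem.Dict.getD_modify, PySem.Dict.getD_modify]
    simp only [List.mem_cons, Prod.mk.injEq]
    split_ifs <;> simp_all <;> tauto

lemma pvGraph_mem {roads : List (Int × Int × Int)} (a : Int) (p : Int × Int) :
    p ∈ (pvGraph roads).getD a [] ↔ pvEdge roads a p.1 p.2 := by
  rw [pvGraph, pvGraph_mem_aux, pvEdge]
  simp [PySem.Dict.getD_empty]

lemma pvHeapPush_mem (h : List (Int × Int)) (x p : Int × Int) :
    p ∈ pvHeapPush h x ↔ p = x ∨ p ∈ h := by
  induction h with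
  | nil => simp [pvHeapPush]
  | cons y ys ih =>
    rw [pvHeapPush]
    split_ifs with hc
    · rw [List.mem_cons]
    · rw [List.mem_cons, ih, List.mem_cons]; tauto

lemma pvMu_update_none {n v : Int} {dist : Int → Option Int} (hv1 : 1 ≤ v) (hv2 : v ≤ n)
    (h : dist v = none) (nv : Int) :
    (pvMu n (fun x => if x = v then some nv else dist x)).1 < (pvMu n dist).1 := by
  have hcast : ((v.toNat : Nat) : Int) = v := by omega
  have hvmem : v.toNat ∈ (Finset.range (n.toNat + 1)).filter
      (fun i => dist ((i : Nat) : Int) = none) := by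
    simp only [Finset.mem_filter, Finset.mem_range]
    exact ⟨by omega, by rw [hcast]; exact h⟩
  have hvnot : v.toNat ∉ (Finset.range (n.toNat + 1)).filter
      (fun i => (fun x => if x = v then some nv else dist x) ((i : Nat) : Int) = none) := by
    intro hmem'
    have hbad := (Finset.mem_filter.mp hmem').2
    simp [hcast] at hbad
  have hsub : (Finset.range (n.toNat + 1)).filter
      (fun i => (fun x => if x = v then some nv else dist x) ((i : Nat) : Int) = none) ⊆
      (Finset.range (n.toNat + 1)).filter (fun i => dist ((i : Nat) : Int) = none) := by
    intro i hi
    simp only [Finset.mem_filter, Finset.mem_range] at hi ⊢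
    refine ⟨hi.1, ?_⟩
    have hcond := hi.2
    by_cases hiv : ((i : Nat) : Int) = v
    · simp [hiv] at hcond
    · simpa only [if_neg hiv] using hcond
  simp only [pvMu]
  exact Finset.card_lt_card ((Finset.ssubset_iff_of_subset hsub).mpr ⟨v.toNat, hvmem, hvnot⟩)

lemma pvMu_update_some {n v : Int} {dist : Int → Option Int} (hv1 : 1 ≤ v) (hv2 : v ≤ n)
    {o nv : Int} (h : dist v = some o) (h0 : 0 ≤ nv) (hlt : nv < o) :
    (pvMu n (fun x => if x = v then some nv else dist x)).1 = (pvMu n dist).1 ∧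
    (pvMu n (fun x => if x = v then some nv else dist x)).2 < (pvMu n dist).2 := by
  have hcast : ((v.toNat : Nat) : Int) = v := by omega
  constructor
  · simp only [pvMu]
    congr 1
    apply Finset.filter_congr
    intro i _
    by_cases hiv : ((i : Nat) : Int) = v
    · rw [if_pos hiv, hiv, h]
      simp
    · rw [if_neg hiv]
  · simp only [pvMu]
    apply Finset.sum_lt_sum
    · intro i _
      by_cases hiv : ((i : Nat) : Int) = v
      · rw [if_pos hiv, hiv, h]
        simp only [Option.getD_some]
        omega
      · rw [if_neg hiv]
    · refine ⟨v.toNat, by simp only [Finset.mem_range]; omega, ?_⟩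
      rw [hcast, if_pos rfl, h]
      simp only [Option.getD_some]
      omega

lemma pvRelax_cons (dist : Int → Option Int) (heap : List (Int × Int)) (u : Int)
    (q : Int × Int) (tl : List (Int × Int)) {du : Int} (hdu : dist u = some du) :
    pvRelax dist heap u (q :: tl) =
      if pvLtInf (du + q.2) (dist q.1) then
        pvRelax (fun x => if x = q.1 then some (du + q.2) else dist x)
          (pvHeapPush heap (du + q.2, q.1)) u tl
      else pvRelax dist heap u tl := by
  rw [pvRelax, List.foldl_cons]
  simp only [hdu]
  split_ifs with hc <;> rfl

lemma pvRelax_spec {n u du : Int} (hdu0 : 0 ≤ du) :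
    ∀ {nbrs : List (Int × Int)}, (∀ p ∈ nbrs, (1 ≤ p.1 ∧ p.1 ≤ n) ∧ 0 ≤ p.2) →
    ∀ (dist : Int → Option Int) (heap : List (Int × Int)), dist u = some du →
    (pvRelax dist heap u nbrs).1 u = some du ∧
    (∀ v o, dist v = some o → ∃ dv, (pvRelax dist heap u nbrs).1 v = some dv ∧ dv ≤ o) ∧
    (∀ v dv, (pvRelax dist heap u nbrs).1 v = some dv →
       dist v = some dv ∨ ((dv, v) ∈ (pvRelax dist heap u nbrs).2 ∧ 1 ≤ v ∧ v ≤ n ∧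
         ∃ w, (v, w) ∈ nbrs ∧ dv = du + w)) ∧
    (∀ p ∈ heap, p ∈ (pvRelax dist heap u nbrs).2) ∧
    (∀ p ∈ (pvRelax dist heap u nbrs).2,
       p ∈ heap ∨ ∃ dp, (pvRelax dist heap u nbrs).1 p.2 = some dp ∧ dp ≤ p.1) ∧
    (∀ p ∈ nbrs, ∃ dv, (pvRelax dist heap u nbrs).1 p.1 = some dv ∧ dv ≤ du + p.2) ∧
    ((pvMu n (pvRelax dist heap u nbrs).1).1 < (pvMu n dist).1 ∨
      ((pvMu n (pvRelax dist heap u nbrs).1).1 = (pvMu n dist).1 ∧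
       (pvMu n (pvRelax dist heap u nbrs).1).2 < (pvMu n dist).2) ∨
      ((pvRelax dist heap u nbrs).1 = dist ∧ (pvRelax dist heap u nbrs).2 = heap)) := by
  intro nbrs
  induction nbrs with
  | nil =>
    intro _ dist heap hdu
    refine ⟨hdu, fun v o h => ⟨o, h, le_rfl⟩, fun v dv h => Or.inl h, fun p hp => hp,
      fun p hp => Or.inl hp, fun p hp => by simp at hp, Or.inr (Or.inr ⟨rfl, rfl⟩)⟩
  | cons q tl ih =>
    intro hnb dist heap hdu
    have hq := hnb q (List.mem_cons_self ..)
    have htl : ∀ p ∈ tl, (1 ≤ p.1 ∧ p.1 ≤ n) ∧ 0 ≤ p.2 :=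
      fun p hp => hnb p (List.mem_cons_of_mem _ hp)
    by_cases hc : pvLtInf (du + q.2) (dist q.1) = true
    · -- the relaxation fires
      have huq : u ≠ q.1 := by
        intro hequ
        rw [← hequ, hdu] at hc
        simp only [pvLtInf, decide_eq_true_eq] at hc
        omega
      set d1 : Int → Option Int := fun x => if x = q.1 then some (du + q.2) else dist x with hd1
      set h1 : List (Int × Int) := pvHeapPush heap (du + q.2, q.1) with hh1
      have hred : pvRelax dist heap u (q :: tl) = pvRelax d1 h1 u tl := by
        rw [pvRelax_cons dist heap u q tl hdu, if_pos hc]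
      have hd1u : d1 u = some du := by simp only [hd1, if_neg huq]; exact hdu
      obtain ⟨C1, C2, C3, C4, C5, C6, C7⟩ := ih htl d1 h1 hd1u
      rw [hred]
      have hd1q : d1 q.1 = some (du + q.2) := by simp [hd1]
      -- monotone from dist to d1
      have hmono1 : ∀ v o, dist v = some o → ∃ dv, d1 v = some dv ∧ dv ≤ o := by
        intro v o hv
        by_cases hvq : v = q.1
        · subst hvq
          refine ⟨du + q.2, hd1q, ?_⟩
          rw [hv] at hc
          simp only [pvLtInf, decide_eq_true_eq] at hc
          omega
        · exact ⟨o, by simp only [hd1, if_neg hvq]; exact hv, le_rfl⟩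
      refine ⟨C1, ?_, ?_, ?_, ?_, ?_, ?_⟩
      · -- C2
        intro v o hv
        obtain ⟨dv1, hdv1, hle1⟩ := hmono1 v o hv
        obtain ⟨dv2, hdv2, hle2⟩ := C2 v dv1 hdv1
        exact ⟨dv2, hdv2, le_trans hle2 hle1⟩
      · -- C3
        intro v dv hv
        rcases C3 v dv hv with hsame | ⟨hmem, hr1, hr2, w, hwmem, hw⟩
        · by_cases hvq : v = q.1
          · subst hvq
            rw [hd1q] at hsame
            right
            refine ⟨?_, hq.1.1, hq.1.2, q.2, by simp, by injection hsame with h; exact h.symm⟩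
            have : (du + q.2, q.1) ∈ h1 := by rw [hh1, pvHeapPush_mem]; exact Or.inl rfl
            have := C4 _ this
            injection hsame with hsame'
            rw [← hsame']
            exact this
          · left
            simp only [hd1, if_neg hvq] at hsame
            exact hsame
        · exact Or.inr ⟨hmem, hr1, hr2, w, List.mem_cons_of_mem _ hwmem, hw⟩
      · -- C4
        intro p hp
        exact C4 p (by rw [hh1, pvHeapPush_mem]; exact Or.inr hp)
      · -- C5
        intro p hp
        rcases C5 p hp with hp1 | hp2
        · rw [hh1, pvHeapPush_mem] at hp1
          rcases hp1 with rfl | hp1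
          · right
            obtain ⟨dv2, hdv2, hle2⟩ := C2 q.1 (du + q.2) hd1q
            exact ⟨dv2, hdv2, hle2⟩
          · exact Or.inl hp1
        · exact Or.inr hp2
      · -- C6
        intro p hp
        rcases List.mem_cons.mp hp with rfl | hp
        · obtain ⟨dv2, hdv2, hle2⟩ := C2 p.1 (du + p.2) hd1q
          exact ⟨dv2, hdv2, hle2⟩
        · exact C6 p hp
      · -- C7 (measure)
        have hstep : (pvMu n d1).1 < (pvMu n dist).1 ∨
            ((pvMu n d1).1 = (pvMu n dist).1 ∧ (pvMu n d1).2 < (pvMu n dist).2) := by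
          cases hdq : dist q.1 with
          | none =>
            left
            rw [hd1]
            exact pvMu_update_none hq.1.1 hq.1.2 hdq (du + q.2)
          | some b =>
            right
            rw [hd1]
            refine pvMu_update_some hq.1.1 hq.1.2 hdq (by omega) ?_
            rw [hdq] at hc
            simp only [pvLtInf, decide_eq_true_eq] at hc
            exact hc
        rcases C7 with h7 | ⟨h7a, h7b⟩ | ⟨h7a, h7b⟩
        · rcases hstep with hs | ⟨hsa, hsb⟩
          · exact Or.inl (lt_trans h7 hs)
          · exact Or.inl (by rw [← hsa]; exact h7)
        · rcases hstep with hs | ⟨hsa, hsb⟩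
          · exact Or.inl (by rw [h7a]; exact hs)
          · exact Or.inr (Or.inl ⟨by rw [h7a, hsa], lt_trans h7b hsb⟩)
        · rw [h7a]
          rcases hstep with hs | ⟨hsa, hsb⟩
          · exact Or.inl hs
          · exact Or.inr (Or.inl ⟨hsa, hsb⟩)
    · -- no relaxation
      have hred : pvRelax dist heap u (q :: tl) = pvRelax dist heap u tl := by
        rw [pvRelax_cons dist heap u q tl hdu, if_neg hc]
      obtain ⟨C1, C2, C3, C4, C5, C6, C7⟩ := ih htl dist heap hdu
      rw [hred]
      -- from ¬hc: dist q.1 = some b with b ≤ du + q.2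
      have hqle : ∃ b, dist q.1 = some b ∧ b ≤ du + q.2 := by
        cases hdq : dist q.1 with
        | none => rw [hdq] at hc; simp [pvLtInf] at hc
        | some b =>
          rw [hdq] at hc
          simp only [pvLtInf, decide_eq_true_eq] at hc
          exact ⟨b, rfl, by omega⟩
      refine ⟨C1, C2, ?_, C4, C5, ?_, C7⟩
      · intro v dv hv
        rcases C3 v dv hv with hsame | ⟨hmem, hr1, hr2, w, hwmem, hw⟩
        · exact Or.inl hsame
        · exact Or.inr ⟨hmem, hr1, hr2, w, List.mem_cons_of_mem _ hwmem, hw⟩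
      · intro p hp
        rcases List.mem_cons.mp hp with rfl | hp
        · obtain ⟨b, hb, hble⟩ := hqle
          obtain ⟨dv, hdv, hdvle⟩ := C2 p.1 b hb
          exact ⟨dv, hdv, le_trans hdvle hble⟩
        · exact C6 p hp

lemma pvMinD_le_c (mc : Option Int) (c : Int) :
    ∃ m', pvMinD mc c = some m' ∧ m' ≤ c := by
  cases mc with
  | none => exact ⟨c, rfl, le_rfl⟩
  | some m => exact ⟨min m c, rfl, min_le_right _ _⟩

lemma pvMinD_le_m {mc : Option Int} {m0 : Int} (c : Int) (h : mc = some m0) :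
    ∃ m', pvMinD mc c = some m' ∧ m' ≤ m0 := by
  subst h
  exact ⟨min m0 c, rfl, min_le_left _ _⟩

lemma pvMinD_cases (mc : Option Int) (c : Int) :
    pvMinD mc c = some c ∨ ∃ m0, mc = some m0 ∧ pvMinD mc c = some m0 := by
  cases mc with
  | none => exact Or.inl rfl
  | some m =>
    rcases le_total m c with hle | hle
    · exact Or.inr ⟨m, rfl, by rw [pvMinD, min_eq_left hle]⟩
    · exact Or.inl (by rw [pvMinD, min_eq_right hle])

-- the loop invariant of A's Dijkstra run from s
def pvInv (n : Int) (roads : List (Int × Int × Int)) (appleCost : List Int) (k s : Int)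
    (dist : Int → Option Int) (heap : List (Int × Int)) (mc : Option Int) : Prop :=
  (∀ p ∈ heap, ∃ dp, dist p.2 = some dp ∧ dp ≤ p.1) ∧
  (∀ v dv, dist v = some dv → 1 ≤ v ∧ v ≤ n ∧ ∃ es, pvIsWalk roads s es v ∧ pvW es = dv) ∧
  (∀ v dv, dist v = some dv → ((dv, v) ∈ heap ∨
     ((∃ m, mc = some m ∧ m ≤ pvApple appleCost v + dv * (k + 1)) ∧
      ∀ p ∈ (pvGraph roads).getD v [], ∃ d2, dist p.1 = some d2 ∧ d2 ≤ dv + p.2))) ∧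
  (mc = none ∨ ∃ v es, pvIsWalk roads s es v ∧ 1 ≤ v ∧ v ≤ n ∧
     mc = some (pvApple appleCost v + pvW es * (k + 1))) ∧
  (∃ ds, dist s = some ds ∧ ds ≤ 0)

lemma pvALoop_post {n : Int} {roads : List (Int × Int × Int)} {appleCost : List Int} {k s : Int}
    (hk : -1 ≤ k)
    (hr : ∀ r ∈ roads, (1 ≤ r.1 ∧ r.1 ≤ n) ∧ (1 ≤ r.2.1 ∧ r.2.1 ≤ n) ∧ 0 ≤ r.2.2) :
    ∀ (dist : Int → Option Int) (heap : List (Int × Int)) (mc : Option Int),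
    pvInv n roads appleCost k s dist heap mc →
    ∃ m, pvALoop n (pvGraph roads) appleCost k dist heap mc = some m ∧
      (∀ u es, pvIsWalk roads s es u → m ≤ pvApple appleCost u + pvW es * (k + 1)) ∧
      (∃ u es, pvIsWalk roads s es u ∧ 1 ≤ u ∧ u ≤ n ∧
        m = pvApple appleCost u + pvW es * (k + 1)) := by
  have ht : (0 : Int) ≤ k + 1 := by omega
  have hw0 : ∀ r ∈ roads, 0 ≤ r.2.2 := fun r hm => (hr r hm).2.2
  intro dist heap mc
  induction dist, heap, mc using pvALoop.induct (n := n) (adj := pvGraph roads)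
      (appleCost := appleCost) (k := k) with
  | case1 dist mc =>
    intro hInv
    obtain ⟨H1, H2, H3, H4, H5⟩ := hInv
    obtain ⟨ds, hds, hds0⟩ := H5
    rcases H3 s ds hds with hmem | ⟨⟨m, hmc, hmle⟩, hedges⟩
    · simp at hmem
    have reach : ∀ (es : List (Int × Int × Int)) (v dv : Int), dist v = some dv →
        ∀ u', pvIsWalk roads v es u' → ∃ du', dist u' = some du' ∧ du' ≤ dv + pvW es := by
      intro es
      induction es with
      | nil =>
        intro v dv hv u' hwd
        have : u' = v := hwd
        subst this
        exact ⟨dv, hv, by rw [pvW_nil]; omega⟩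
      | cons e tl ihe =>
        intro v dv hv u' hwd
        obtain ⟨he1, he2, he3⟩ := hwd
        have hadj : (e.2.1, e.2.2) ∈ (pvGraph roads).getD v [] := (pvGraph_mem v _).mpr he2
        rcases H3 v dv hv with hmem' | ⟨_, hedges'⟩
        · simp at hmem'
        obtain ⟨d2, hd2, hd2le⟩ := hedges' _ hadj
        obtain ⟨du', hdu', hdu'le⟩ := ihe e.2.1 d2 hd2 u' he3
        exact ⟨du', hdu', by rw [pvW_cons]; omega⟩
    refine ⟨m, ?_, ?_, ?_⟩
    · rw [pvALoop]
      exact hmc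
    · intro u es hwk
      obtain ⟨du', hdu', hdu'le⟩ := reach es s ds hds u hwk
      rcases H3 u du' hdu' with hmem' | ⟨⟨m2, hmc2, hm2le⟩, _⟩
      · simp at hmem'
      have hmm : m2 = m := by
        rw [hmc] at hmc2
        injection hmc2 with h
        exact h.symm
      have hdw : du' ≤ pvW es := by omega
      have hprod := mul_le_mul_of_nonneg_right hdw ht
      omega
    · rcases H4 with h4 | ⟨v0, es0, hw0', h01, h02, h0eq⟩
      · rw [h4] at hmc; cases hmc
      · refine ⟨v0, es0, hw0', h01, h02, ?_⟩
        rw [hmc] at h0eq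
        injection h0eq with h
        try exact h
        try exact h.symm
  | case2 dist mc d u rest hnone =>
    intro hInv
    obtain ⟨dp, hdp, _⟩ := hInv.1 (d, u) (by simp)
    simp [hnone] at hdp
  | case3 dist mc d u rest b hb hlt ih =>
    intro hInv
    obtain ⟨H1, H2, H3, H4, H5⟩ := hInv
    have hInv' : pvInv n roads appleCost k s dist rest mc := by
      refine ⟨fun p hp => H1 p (List.mem_cons_of_mem _ hp), H2, ?_, H4, H5⟩
      intro v dv hv
      rcases H3 v dv hv with hmem | hdone
      · rcases List.mem_cons.mp hmem with heq | hmem'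
        · exfalso
          have hv2 : v = u := congrArg Prod.snd heq
          have hd2 : dv = d := congrArg Prod.fst heq
          rw [hv2, hb] at hv
          injection hv with hv'
          omega
        · exact Or.inl hmem'
      · exact Or.inr hdone
    obtain ⟨m, hm, hub, hlb⟩ := ih hInv'
    refine ⟨m, ?_, hub, hlb⟩
    rw [pvALoop]
    simp only [hb]
    rw [if_pos hlt]
    exact hm
  | case4 dist mc d u rest b hb hnlt c mc' st hguard ih =>
    intro hInv
    obtain ⟨H1, H2, H3, H4, H5⟩ := hInv
    have hcdef : c = pvApple appleCost u + d * (k + 1) := rfl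
    have hmcdef : mc' = pvMinD mc c := rfl
    have hstdef : st = pvRelax dist rest u ((pvGraph roads).getD u []) := rfl
    rw [hstdef] at hguard
    rw [hstdef, hmcdef, hcdef] at ih
    obtain ⟨dp, hdp, hdple⟩ := H1 (d, u) (by simp)
    have hbd : b = d := by
      rw [hb] at hdp
      injection hdp with h
      omega
    subst hbd
    obtain ⟨hu1, hu2, esu, hesu, hesuW⟩ := H2 u b hb
    have hd0 : 0 ≤ b := by
      have := pvW_nonneg hw0 hesu
      omega
    have hnb : ∀ p ∈ (pvGraph roads).getD u [], (1 ≤ p.1 ∧ p.1 ≤ n) ∧ 0 ≤ p.2 := by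
      intro p hp
      rcases (pvGraph_mem u p).mp hp with h | h
      · exact ⟨(hr (u, p.1, p.2) h).2.1, (hr (u, p.1, p.2) h).2.2⟩
      · exact ⟨(hr (p.1, u, p.2) h).1, (hr (p.1, u, p.2) h).2.2⟩
    obtain ⟨C1, C2, C3, C4, C5, C6, C7⟩ :=
      pvRelax_spec (n := n) hd0 hnb dist rest hb
    have hreal_c : ∃ v es, pvIsWalk roads s es v ∧ 1 ≤ v ∧ v ≤ n ∧
        (pvApple appleCost u + b * (k + 1)) = pvApple appleCost v + pvW es * (k + 1) :=
      ⟨u, esu, hesu, hu1, hu2, by rw [hesuW]⟩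
    have hmc'real : pvMinD mc (pvApple appleCost u + b * (k + 1)) = none ∨
        ∃ v es, pvIsWalk roads s es v ∧ 1 ≤ v ∧ v ≤ n ∧
          pvMinD mc (pvApple appleCost u + b * (k + 1)) =
            some (pvApple appleCost v + pvW es * (k + 1)) := by
      right
      rcases pvMinD_cases mc (pvApple appleCost u + b * (k + 1)) with hcse | ⟨m0, hm0, hcse⟩
      · obtain ⟨v0, es0, hwv, h01, h02, heq⟩ := hreal_c
        exact ⟨v0, es0, hwv, h01, h02, by rw [hcse, heq]⟩
      · rcases H4 with h4 | ⟨v0, es0, hwv, h01, h02, heq⟩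
        · rw [h4] at hm0; cases hm0
        · refine ⟨v0, es0, hwv, h01, h02, ?_⟩
          rw [hcse]
          rw [hm0] at heq
          injection heq with h
          rw [h]
    have hInv' : pvInv n roads appleCost k s
        (pvRelax dist rest u ((pvGraph roads).getD u [])).1
        (pvRelax dist rest u ((pvGraph roads).getD u [])).2
        (pvMinD mc (pvApple appleCost u + b * (k + 1))) := by
      refine ⟨?_, ?_, ?_, hmc'real, ?_⟩
      · intro p hp
        rcases C5 p hp with hp1 | hp2
        · obtain ⟨dp', hdp', hdple'⟩ := H1 p (List.mem_cons_of_mem _ hp1)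
          obtain ⟨dv, hdv, hdvle⟩ := C2 p.2 dp' hdp'
          exact ⟨dv, hdv, le_trans hdvle hdple'⟩
        · exact hp2
      · intro v dv hv
        rcases C3 v dv hv with hsame | ⟨hmem, hv1, hv2, w, hwmem, rfl⟩
        · exact H2 v dv hsame
        · refine ⟨hv1, hv2, esu ++ [(u, v, w)],
            pvWalk_append ((pvGraph_mem u (v, w)).mp hwmem) hesu, ?_⟩
          rw [pvW_append, hesuW]
          simp [pvW]
      · intro v dv hv
        rcases C3 v dv hv with hsame | ⟨hmem, _, _, _, _, _⟩
        · rcases H3 v dv hsame with hmemh | ⟨⟨m0, hm0, hm0le⟩, hedges⟩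
          · rcases List.mem_cons.mp hmemh with heq | hmemr
            · have hveq : v = u := congrArg Prod.snd heq
              have hdveq : dv = b := congrArg Prod.fst heq
              right
              constructor
              · obtain ⟨m', hm', hm'le⟩ := pvMinD_le_c mc (pvApple appleCost u + b * (k + 1))
                refine ⟨m', hm', ?_⟩
                rw [hveq, hdveq]
                exact hm'le
              · intro p hp
                rw [hveq] at hp
                obtain ⟨dv', hdv', hdv'le⟩ := C6 p hp
                refine ⟨dv', hdv', ?_⟩
                rw [hdveq]
                omega
            · exact Or.inl (C4 _ hmemr)
          · right
            refine ⟨?_, ?_⟩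
            · obtain ⟨m', hm', hm'le⟩ := pvMinD_le_m (pvApple appleCost u + b * (k + 1)) hm0
              exact ⟨m', hm', le_trans hm'le hm0le⟩
            · intro p hp
              obtain ⟨d2, hd2, hd2le⟩ := hedges p hp
              obtain ⟨d2', hd2', hd2'le⟩ := C2 p.1 d2 hd2
              exact ⟨d2', hd2', by omega⟩
        · exact Or.inl hmem
      · obtain ⟨ds, hds, hds0⟩ := H5
        obtain ⟨ds', hds', hds'le⟩ := C2 s ds hds
        exact ⟨ds', hds', by omega⟩
    obtain ⟨m, hm, hub, hlb⟩ := ih hInv'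
    refine ⟨m, ?_, hub, hlb⟩
    rw [pvALoop]
    simp only [hb]
    rw [if_neg hnlt]
    rw [dif_pos hguard]
    exact hm
  | case5 dist mc d u rest b hb hnlt st hnguard =>
    intro hInv
    exfalso
    obtain ⟨H1, H2, H3, H4, H5⟩ := hInv
    have hstdef : st = pvRelax dist rest u ((pvGraph roads).getD u []) := rfl
    rw [hstdef] at hnguard
    obtain ⟨dp, hdp, hdple⟩ := H1 (d, u) (by simp)
    have hbd : b = d := by
      rw [hb] at hdp
      injection hdp with h
      omega
    subst hbd
    obtain ⟨hu1, hu2, esu, hesu, hesuW⟩ := H2 u b hb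
    have hd0 : 0 ≤ b := by
      have := pvW_nonneg hw0 hesu
      omega
    have hnb : ∀ p ∈ (pvGraph roads).getD u [], (1 ≤ p.1 ∧ p.1 ≤ n) ∧ 0 ≤ p.2 := by
      intro p hp
      rcases (pvGraph_mem u p).mp hp with h | h
      · exact ⟨(hr (u, p.1, p.2) h).2.1, (hr (u, p.1, p.2) h).2.2⟩
      · exact ⟨(hr (p.1, u, p.2) h).1, (hr (p.1, u, p.2) h).2.2⟩
    obtain ⟨C1, C2, C3, C4, C5, C6, C7⟩ :=
      pvRelax_spec (n := n) hd0 hnb dist rest hb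
    apply hnguard
    rcases C7 with h7 | ⟨h7a, h7b⟩ | ⟨h7a, h7b⟩
    · exact Or.inl h7
    · exact Or.inr (Or.inl ⟨h7a, h7b⟩)
    · refine Or.inr (Or.inr ⟨?_, ?_⟩)
      · rw [h7a]
      · rw [h7b]
        omega

-- ---- B side ----

lemma pvBUpd_apply (best : Int → Int) (v val x : Int) :
    pvBUpd best v val x = if x = v then val else best x := rfl

lemma pvBHalf_le (t : Int) (best : Int → Int) (r : Int × Int × Int) (x : Int) :
    pvBHalf t best r x ≤ best x := by
  unfold pvBHalf
  split_ifs with h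
  · rw [pvBUpd_apply]
    split_ifs with hx
    · subst hx; exact le_of_lt h
    · exact le_rfl
  · exact le_rfl

lemma pvBStep2_le (t : Int) (b1 : Int → Int) (r : Int × Int × Int) (x : Int) :
    pvBStep2 t b1 r x ≤ b1 x := by
  unfold pvBStep2
  split_ifs with h
  · rw [pvBUpd_apply]
    split_ifs with hx
    · subst hx; exact le_of_lt h
    · exact le_rfl
  · exact le_rfl

lemma pvBStep_le (t : Int) (best : Int → Int) (r : Int × Int × Int) (x : Int) :
    pvBStep t best r x ≤ best x :=
  le_trans (pvBStep2_le t _ r x) (pvBHalf_le t best r x)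

lemma pvBFoldl_le (t : Int) :
    ∀ (l : List (Int × Int × Int)) (best : Int → Int) (x : Int),
      (l.foldl (pvBStep t) best) x ≤ best x := by
  intro l
  induction l with
  | nil => intro best x; exact le_rfl
  | cons r tlr ih =>
    intro best x
    rw [List.foldl_cons]
    exact le_trans (ih _ x) (pvBStep_le t best r x)

lemma pvBRound_le (roads : List (Int × Int × Int)) (t : Int) (best : Int → Int) (x : Int) :
    pvBRound roads t best x ≤ best x := pvBFoldl_le t roads best x

lemma pvBHalf_relv (t : Int) (best : Int → Int) (r : Int × Int × Int) :
    pvBHalf t best r r.2.1 ≤ best r.1 + r.2.2 * t := by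
  unfold pvBHalf
  split_ifs with h
  · rw [pvBUpd_apply, if_pos rfl]
  · omega

lemma pvBStep_rel (t : Int) (best : Int → Int) (r : Int × Int × Int) :
    pvBStep t best r r.2.1 ≤ best r.1 + r.2.2 * t ∧
    pvBStep t best r r.1 ≤ best r.2.1 + r.2.2 * t := by
  constructor
  · exact le_trans (pvBStep2_le t _ r r.2.1) (pvBHalf_relv t best r)
  · unfold pvBStep pvBStep2
    split_ifs with h
    · rw [pvBUpd_apply, if_pos rfl]
      have := pvBHalf_le t best r r.2.1
      omega
    · have h2 := pvBHalf_le t best r r.2.1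
      omega

lemma pvBRound_rel (roads : List (Int × Int × Int)) (t : Int) (best : Int → Int)
    {r : Int × Int × Int} (hm : r ∈ roads) :
    pvBRound roads t best r.2.1 ≤ best r.1 + r.2.2 * t ∧
    pvBRound roads t best r.1 ≤ best r.2.1 + r.2.2 * t := by
  obtain ⟨l1, l2, rfl⟩ := List.append_of_mem hm
  unfold pvBRound
  rw [List.foldl_append, List.foldl_cons]
  have hmidle : ∀ x, (List.foldl (pvBStep t) best l1) x ≤ best x :=
    fun x => pvBFoldl_le t l1 best x
  have hs := pvBStep_rel t (List.foldl (pvBStep t) best l1) r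
  constructor
  · refine le_trans (pvBFoldl_le t l2 _ _) (le_trans hs.1 ?_)
    have := hmidle r.1; omega
  · refine le_trans (pvBFoldl_le t l2 _ _) (le_trans hs.2 ?_)
    have := hmidle r.2.1; omega

-- soundness: every table entry is realized by some walk
def pvSound (n : Int) (roads : List (Int × Int × Int)) (appleCost : List Int) (k : Int)
    (best : Int → Int) : Prop :=
  ∀ v, 1 ≤ v → v ≤ n → ∃ u es, pvIsWalk roads v es u ∧ 1 ≤ u ∧ u ≤ n ∧
    best v = pvApple appleCost u + pvW es * (k + 1)

-- realizability transport along a prepended edge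
lemma pvSound_val {n : Int} {roads : List (Int × Int × Int)} {appleCost : List Int} {k : Int}
    {a b w val : Int} (he : pvEdge roads a b w)
    (hex : ∃ u es, pvIsWalk roads b es u ∧ 1 ≤ u ∧ u ≤ n ∧
      val = pvApple appleCost u + pvW es * (k + 1)) :
    ∃ u es, pvIsWalk roads a es u ∧ 1 ≤ u ∧ u ≤ n ∧
      val + w * (k + 1) = pvApple appleCost u + pvW es * (k + 1) := by
  obtain ⟨u, es, hw, h1, h2, hv⟩ := hex
  refine ⟨u, (a, b, w) :: es, ⟨rfl, he, hw⟩, h1, h2, ?_⟩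
  rw [hv, pvW_cons]
  ring

lemma pvIfUpd_sound {n : Int} {roads : List (Int × Int × Int)} {appleCost : List Int} {k : Int}
    {best : Int → Int} (hS : pvSound n roads appleCost k best) {a val : Int}
    (hval : ∃ u es, pvIsWalk roads a es u ∧ 1 ≤ u ∧ u ≤ n ∧
      val = pvApple appleCost u + pvW es * (k + 1)) :
    pvSound n roads appleCost k (pvBUpd best a val) := by
  intro v hv1 hv2
  rw [pvBUpd_apply]
  by_cases hva : v = a
  · rw [if_pos hva]
    subst hva
    exact hval
  · rw [if_neg hva]
    exact hS v hv1 hv2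

lemma pvBStep_sound {n : Int} {roads : List (Int × Int × Int)} {appleCost : List Int} {k : Int}
    (hr : ∀ r ∈ roads, (1 ≤ r.1 ∧ r.1 ≤ n) ∧ (1 ≤ r.2.1 ∧ r.2.1 ≤ n) ∧ 0 ≤ r.2.2)
    {best : Int → Int} {r : Int × Int × Int} (hm : r ∈ roads)
    (hS : pvSound n roads appleCost k best) :
    pvSound n roads appleCost k (pvBStep (k + 1) best r) := by
  have hrr := hr r hm
  have e1 : pvEdge roads r.2.1 r.1 r.2.2 := Or.inr hm
  have e2 : pvEdge roads r.1 r.2.1 r.2.2 := Or.inl hm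
  have hb1S : pvSound n roads appleCost k (pvBHalf (k + 1) best r) := by
    unfold pvBHalf
    split_ifs with h1
    · exact pvIfUpd_sound hS (pvSound_val e1 (hS r.1 hrr.1.1 hrr.1.2))
    · exact hS
  unfold pvBStep pvBStep2
  split_ifs with h2
  · exact pvIfUpd_sound hb1S (pvSound_val e2 (hb1S r.2.1 hrr.2.1.1 hrr.2.1.2))
  · exact hb1S

lemma pvBFoldl_sound {n : Int} {roads : List (Int × Int × Int)} {appleCost : List Int} {k : Int}
    (hr : ∀ r ∈ roads, (1 ≤ r.1 ∧ r.1 ≤ n) ∧ (1 ≤ r.2.1 ∧ r.2.1 ≤ n) ∧ 0 ≤ r.2.2) :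
    ∀ (l : List (Int × Int × Int)), (∀ r ∈ l, r ∈ roads) →
    ∀ {best : Int → Int}, pvSound n roads appleCost k best →
    pvSound n roads appleCost k (l.foldl (pvBStep (k + 1)) best) := by
  intro l
  induction l with
  | nil => intro _ best hS; exact hS
  | cons r tlr ih =>
    intro hmem best hS
    rw [List.foldl_cons]
    exact ih (fun r' h => hmem r' (List.mem_cons_of_mem _ h))
      (pvBStep_sound hr (hmem r (by simp)) hS)

lemma pvBRound_sound {n : Int} {roads : List (Int × Int × Int)} {appleCost : List Int} {k : Int}
    (hr : ∀ r ∈ roads, (1 ≤ r.1 ∧ r.1 ≤ n) ∧ (1 ≤ r.2.1 ∧ r.2.1 ≤ n) ∧ 0 ≤ r.2.2)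
    {best : Int → Int} (hS : pvSound n roads appleCost k best) :
    pvSound n roads appleCost k (pvBRound roads (k + 1) best) :=
  pvBFoldl_sound hr roads (fun _ h => h) hS

def pvBIter (roads : List (Int × Int × Int)) (appleCost : List Int) (k : Int) (m : Nat) :
    Int → Int :=
  (List.range m).foldl (fun b _ => pvBRound roads (k + 1) b) (fun v => pvApple appleCost v)

lemma pvBIter_succ (roads : List (Int × Int × Int)) (appleCost : List Int) (k : Int) (m : Nat) :
    pvBIter roads appleCost k (m + 1) = pvBRound roads (k + 1) (pvBIter roads appleCost k m) := by
  rw [pvBIter, pvBIter, List.range_succ, List.foldl_append, List.foldl_cons, List.foldl_nil]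

lemma pvBIter_sound {n : Int} {roads : List (Int × Int × Int)} {appleCost : List Int} {k : Int}
    (hr : ∀ r ∈ roads, (1 ≤ r.1 ∧ r.1 ≤ n) ∧ (1 ≤ r.2.1 ∧ r.2.1 ≤ n) ∧ 0 ≤ r.2.2) (m : Nat) :
    pvSound n roads appleCost k (pvBIter roads appleCost k m) := by
  induction m with
  | zero =>
    intro v hv1 hv2
    refine ⟨v, [], rfl, hv1, hv2, ?_⟩
    have h0 : pvBIter roads appleCost k 0 v = pvApple appleCost v := rfl
    rw [h0, pvW_nil, zero_mul, add_zero]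
  | succ m ih =>
    rw [pvBIter_succ]
    exact pvBRound_sound hr ih

lemma pvBIter_complete {roads : List (Int × Int × Int)} {appleCost : List Int} {k : Int} :
    ∀ (m : Nat) (v u : Int) (es : List (Int × Int × Int)), pvIsWalk roads v es u →
    es.length ≤ m →
    pvBIter roads appleCost k m v ≤ pvApple appleCost u + pvW es * (k + 1) := by
  intro m
  induction m with
  | zero =>
    intro v u es hw hlen
    have hes : es = [] := List.eq_nil_of_length_eq_zero (Nat.le_zero.mp hlen)
    subst hes
    obtain rfl : u = v := hw
    have h0 : pvBIter roads appleCost k 0 u = pvApple appleCost u := rfl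
    rw [h0, pvW_nil]
    have hz : (0 : Int) * (k + 1) = 0 := zero_mul _
    omega
  | succ m ih =>
    intro v u es hw hlen
    rw [pvBIter_succ]
    cases es with
    | nil =>
      obtain rfl : u = v := hw
      refine le_trans (pvBRound_le roads (k + 1) _ u) ?_
      exact ih u u [] rfl (by simp)
    | cons e tl =>
      obtain ⟨h1, h2, h3⟩ := hw
      have hstep : pvBRound roads (k + 1) (pvBIter roads appleCost k m) v ≤
          pvBIter roads appleCost k m e.2.1 + e.2.2 * (k + 1) := by
        rcases h2 with h | h
        · have := (pvBRound_rel roads (k + 1) (pvBIter roads appleCost k m)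
            (r := (v, e.2.1, e.2.2)) h).2
          simpa using this
        · have := (pvBRound_rel roads (k + 1) (pvBIter roads appleCost k m)
            (r := (e.2.1, v, e.2.2)) h).1
          simpa using this
      refine le_trans hstep ?_
      have hlen' : tl.length ≤ m := by
        simp only [List.length_cons] at hlen
        omega
      have hih := ih e.2.1 u tl h3 hlen'
      rw [pvW_cons]
      have hrw : (e.2.2 + pvW tl) * (k + 1) = pvW tl * (k + 1) + e.2.2 * (k + 1) := by ring
      omega

-- ---- glue ----

lemma pvPerStart {n : Int} {roads : List (Int × Int × Int)} {appleCost : List Int} {k s : Int}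
    (hk : -1 ≤ k)
    (hr : ∀ r ∈ roads, (1 ≤ r.1 ∧ r.1 ≤ n) ∧ (1 ≤ r.2.1 ∧ r.2.1 ≤ n) ∧ 0 ≤ r.2.2)
    (hs1 : 1 ≤ s) (hs2 : s ≤ n) :
    (pvALoop n (pvGraph roads) appleCost k (fun v => if v = s then some 0 else none)
      [(0, s)] none).getD 0 = pvBIter roads appleCost k n.toNat s := by
  have ht : (0 : Int) ≤ k + 1 := by omega
  have hInv0 : pvInv n roads appleCost k s (fun v => if v = s then some 0 else none)
      [(0, s)] none := by
    refine ⟨?_, ?_, ?_, Or.inl rfl, ⟨0, by simp, le_rfl⟩⟩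
    · intro p hp
      have hp' : p = (0, s) := by simpa using hp
      subst hp'
      exact ⟨0, by simp, le_rfl⟩
    · intro v dv hv
      change (if v = s then some 0 else none) = some dv at hv
      by_cases hvs : v = s
      · subst hvs
        rw [if_pos rfl] at hv
        injection hv with hv'
        exact ⟨hs1, hs2, [], rfl, by rw [pvW_nil]; omega⟩
      · rw [if_neg hvs] at hv; cases hv
    · intro v dv hv
      change (if v = s then some 0 else none) = some dv at hv
      by_cases hvs : v = s
      · subst hvs
        rw [if_pos rfl] at hv
        injection hv with hv'
        left
        rw [← hv']
        exact List.mem_singleton.mpr rfl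
      · rw [if_neg hvs] at hv; cases hv
  obtain ⟨m, hrun, hub, u, es, hw, hu1, hu2, hm⟩ := pvALoop_post hk hr _ _ _ hInv0
  rw [hrun, Option.getD_some]
  apply le_antisymm
  · obtain ⟨uB, esB, hwB, _, _, hB⟩ := pvBIter_sound (appleCost := appleCost) (k := k) hr n.toNat s hs1 hs2
    rw [hB]
    exact hub uB esB hwB
  · obtain ⟨es', hw', hle, hlen⟩ := pvWalk_shorten hr hs1 hs2 hw
    have h1 := pvBIter_complete (appleCost := appleCost) (k := k) n.toNat s u es' hw' (le_of_lt hlen)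
    have h2 : pvW es' * (k + 1) ≤ pvW es * (k + 1) := mul_le_mul_of_nonneg_right hle ht
    rw [hm]
    omega

-- ===== VERDICT (by name: the statement is the Claim_ definition above) =====
theorem minimum_cost_to_reach_destination_spec : Claim_equal_minimum_cost_to_reach_destination := by
  intro n roads appleCost k _ hPre
  unfold Spec_minimum_cost_to_reach_destination
  simp only [minimum_cost_to_reach_destination, minimum_cost_to_reach_destination_alt]
  rw [PySem.List.pyRange_one]
  have hnn : (n + 1 - 1) = n := by ring
  rw [hnn, List.map_map]
  apply List.map_congr_left
  intro i hi
  have hi' : (i : Nat) < n.toNat := List.mem_range.mp hi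
  have hn1 : 1 ≤ n := by omega
  rcases hPre with hle | ⟨hlen, hk, hr⟩
  · omega
  have hs1 : (1 : Int) ≤ 1 + (i : Int) := by omega
  have hs2 : 1 + (i : Int) ≤ n := by omega
  have hps := pvPerStart (appleCost := appleCost) (s := 1 + (i : Int)) hk hr hs1 hs2
  simp only [Function.comp]
  rw [hps]
  rw [show (1 : Int) + (i : Int) = (i : Int) + 1 from by omega]
  rfl
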